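-- pv_equiv track=rewrite | github.com/PHAMTIEN04/Learn-Python | BT HUSC/Ôn Tập/Giải Đề/Đề 1/cau1.py | string_e
-- ===== SOURCE A (Python) =====
-- def string_e(value):
--     # Reverse the input string until a space is encountered or the end of the string
--     str_r = ""
--     for i in reversed(value):
--         if i == " ":
--             break
--         else:
--             str_r += i
--
--     # Reverse the reversed string to get the original order
--     str_n = ""
--     for i in reversed(str_r):
--         str_n += i
--
--     return str_n
-- ===== SOURCE B (Python) =====
-- def string_e(value):
--     # Single forward pass: accumulate the current word, resetting at each space.
--     cur = ""
--     for ch in value: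
--         if ch == " ":
--             cur = ""
--         else:
--             cur += ch
--     return cur
-- ===== Notes on version B (the rewrite author's own statement) =====
-- stated objective: simpler
-- what changed: B replaces A's two backward passes (reversed accumulation until a space, then a second reversing loop) with one forward pass that accumulates the current word and resets it at each space.
import Mathlib
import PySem

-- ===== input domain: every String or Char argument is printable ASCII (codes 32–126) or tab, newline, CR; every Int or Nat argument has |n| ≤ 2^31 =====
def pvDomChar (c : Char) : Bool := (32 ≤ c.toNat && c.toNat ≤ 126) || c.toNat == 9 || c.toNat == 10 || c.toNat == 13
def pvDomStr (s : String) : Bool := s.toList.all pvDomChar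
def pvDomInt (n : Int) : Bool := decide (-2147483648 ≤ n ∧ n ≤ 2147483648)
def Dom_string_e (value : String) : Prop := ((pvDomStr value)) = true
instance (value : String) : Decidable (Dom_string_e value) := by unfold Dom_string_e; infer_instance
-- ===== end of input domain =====

-- ===== PORT A =====
-- B changes A's two reversed-accumulation loops into one forward pass (simpler); same return value.

-- first loop of A: iterate over reversed(value), break at the first space, else str_r += i
def stringELoopA : List Char → List Char → List Char
  | [], strR => strR
  | i :: rest, strR => if i = ' ' then strR else stringELoopA rest (strR ++ [i])

def string_e (value : String) : String :=
  let strR := stringELoopA value.toList.reverse []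
  -- second loop of A: str_n accumulated from reversed(str_r)
  let strN := strR.reverse.foldl (fun strN i => strN ++ [i]) []
  String.mk strN

-- ===== PORT B =====
def string_e_alt (value : String) : String :=
  String.mk (value.toList.foldl (fun cur ch => if ch = ' ' then [] else cur ++ [ch]) [])

-- ===== PRECONDITION & SPEC =====
def Spec_string_e (value : String) (out : String) : Prop := out = string_e_alt value
instance (value : String) (out : String) : Decidable (Spec_string_e value out) := by unfold Spec_string_e; infer_instance

-- ===== CLAIM (what is proved, stated in full; the proofs are below) =====
def Claim_equal_string_e : Prop := ∀ (value : String), Dom_string_e value → Spec_string_e value (string_e value)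

-- ===== LEMMAS AND PROOFS =====

theorem stringELoopA_eq (l acc : List Char) :
    stringELoopA l acc = acc ++ l.takeWhile (· ≠ ' ') := by
  induction l generalizing acc with
  | nil => simp [stringELoopA]
  | cons c rest ih =>
      by_cases h : c = ' '
      · simp [stringELoopA, h, List.takeWhile]
      · simp [stringELoopA, h, List.takeWhile, ih]

theorem foldl_snoc_id (l acc : List Char) :
    l.foldl (fun a c => a ++ [c]) acc = acc ++ l := by
  induction l generalizing acc with
  | nil => simp
  | cons c rest ih => simp [List.foldl, ih]

-- characterisation of B's loop
theorem tw_all (rest : List Char) (hm : ' ' ∉ rest) :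
    rest.reverse.takeWhile (fun x => decide (x ≠ ' ')) = rest.reverse := by
  apply List.takeWhile_eq_self_iff.mpr
  intro x hx
  simp only [decide_eq_true_eq]
  intro h; exact hm (List.mem_reverse.mp (h ▸ hx))

theorem tw_len_ne (rest : List Char) (hm : ' ' ∈ rest) :
    ¬ (rest.reverse.takeWhile (fun x => decide (x ≠ ' '))).length = rest.reverse.length := by
  intro hlen
  have heq := (List.takeWhile_prefix
    (p := fun x => decide (x ≠ ' ')) (l := rest.reverse)).eq_of_length hlen
  have := List.takeWhile_eq_self_iff.mp heq ' ' (List.mem_reverse.mpr hm)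
  simp at this

theorem altLoop_eq (l acc : List Char) :
    l.foldl (fun cur ch => if ch = ' ' then [] else cur ++ [ch]) acc =
      if ' ' ∈ l then (l.reverse.takeWhile (fun x => decide (x ≠ ' '))).reverse
      else acc ++ l := by
  induction l generalizing acc with
  | nil => simp
  | cons c rest ih =>
      simp only [List.foldl, List.reverse_cons, List.mem_cons]
      by_cases h : c = ' '
      · subst h
        rw [if_pos rfl, ih, if_pos (Or.inl rfl), List.takeWhile_append]
        by_cases hm : ' ' ∈ rest
        · rw [if_pos hm, if_neg (tw_len_ne rest hm)]
        · rw [if_neg hm, if_pos (by rw [tw_all rest hm])]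
          simp [List.takeWhile]
      · rw [if_neg h, ih]
        by_cases hm : ' ' ∈ rest
        · rw [if_pos hm, if_pos (Or.inr hm), List.takeWhile_append,
            if_neg (tw_len_ne rest hm)]
        · rw [if_neg hm, if_neg (by
            rintro (hc | hr)
            · exact h hc.symm
            · exact hm hr)]
          simp

-- ===== VERDICT (by name: the statement is the Claim_ definition above) =====
theorem string_e_spec : Claim_equal_string_e := by
  intro value _
  unfold Spec_string_e string_e string_e_alt
  simp only [stringELoopA_eq, foldl_snoc_id, altLoop_eq, List.nil_append]
  by_cases hm : ' ' ∈ value.toList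
  · rw [if_pos hm]
  · rw [if_neg hm, tw_all value.toList hm]
    simp
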